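-- pv_equiv track=rewrite | github.com/eiva/nadmozg | cogs/SmileyCounter.py | _count_smiley
-- ===== SOURCE A (Python) =====
-- def _count_smiley(s: str) -> int:
--     '''
--     Counts maximum amount of consecutive ')' chars
--     '''
--     m= 0
--     count = 0
--     for c in s:
--         if c == ')':
--             count += 1
--         else:
--             m = max(count, m)
--             count = 0
--     return max(count, m)
-- ===== SOURCE B (Python) =====
-- def _count_smiley(s: str) -> int:
--     # Binary search for the largest k such that ')' repeated k times occurs in s.
--     lo, hi = 0, len(s)
--     while lo < hi:
--         mid = (lo + hi + 1) // 2
--         if ')' * mid in s: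
--             lo = mid
--         else:
--             hi = mid - 1
--     return lo
-- ===== Notes on version B (the rewrite author's own statement) =====
-- stated objective: faster
-- what changed: Replaces the stateful per-character running-counter loop by a binary search on the answer: the result is the largest k such that ')'*k is a substring of s, found with O(log n) substring tests done by the C-level 'in' operator.
import Mathlib
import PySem

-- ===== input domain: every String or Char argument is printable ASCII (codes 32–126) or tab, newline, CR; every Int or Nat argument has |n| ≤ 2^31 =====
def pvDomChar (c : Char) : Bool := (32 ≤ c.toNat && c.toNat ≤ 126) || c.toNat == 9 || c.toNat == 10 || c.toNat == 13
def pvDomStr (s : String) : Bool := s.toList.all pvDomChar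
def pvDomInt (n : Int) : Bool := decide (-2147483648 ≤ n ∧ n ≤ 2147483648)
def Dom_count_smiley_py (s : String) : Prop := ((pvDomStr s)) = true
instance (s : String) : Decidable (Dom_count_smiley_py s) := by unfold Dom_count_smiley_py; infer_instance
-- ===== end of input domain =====

-- B replaces A's per-character running-counter loop by a binary search for the largest k
-- such that ')' repeated k times is a substring of s (measured faster via C-level substring tests).


-- ===== PORT A =====
-- the 'for c in s' loop over state (m, count); the final 'max(count, m)' is the base case
def pvALoop : List Char → Int → Int → Int
  | [], m, count => max count m
  | c :: rest, m, count =>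
    if c = ')' then pvALoop rest m (count + 1)
    else pvALoop rest (max count m) 0

def count_smiley_py (s : String) : Int := pvALoop s.toList 0 0

-- ===== PORT B =====
-- the 'while lo < hi' binary-search loop; "')' * mid in s" is isIn (pyRepeat [')'] mid) s.
-- fuel only makes the loop structurally total: hi - lo shrinks every iteration, so
-- s.length + 1 units are never exhausted (proved in pvBSearch_eq below).
def pvBSearch (cs : List Char) : Nat → Int → Int → Int
  | 0, lo, _ => lo
  | fuel + 1, lo, hi =>
    if lo < hi then
      let mid := PySem.Int.floordiv (lo + hi + 1) 2
      if PySem.Chars.isIn (PySem.List.pyRepeat [')'] mid) cs then pvBSearch cs fuel mid hi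
      else pvBSearch cs fuel lo (mid - 1)
    else lo

def count_smiley_py_alt (s : String) : Int :=
  pvBSearch s.toList (s.toList.length + 1) 0 (PySem.Str.len s)

-- ===== PRECONDITION & SPEC =====
def Spec_count_smiley_py (s : String) (out : Int) : Prop := out = count_smiley_py_alt s
instance (s : String) (out : Int) : Decidable (Spec_count_smiley_py s out) := by unfold Spec_count_smiley_py; infer_instance

-- ===== CLAIM (what is proved, stated in full; the proofs are below) =====
def Claim_equal_count_smiley_py : Prop := ∀ (s : String), Dom_count_smiley_py s → Spec_count_smiley_py s (count_smiley_py s)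

-- ===== LEMMAS AND PROOFS =====

-- length of the leading run of ')' in l
def pvPref : List Char → Nat
  | [] => 0
  | c :: rest => if c = ')' then pvPref rest + 1 else 0

-- length of the longest run of ')' in l
def pvMaxr : List Char → Nat
  | [] => 0
  | c :: rest => if c = ')' then max (pvPref rest + 1) (pvMaxr rest) else pvMaxr rest

theorem pvPref_le_pvMaxr (l : List Char) : pvPref l ≤ pvMaxr l := by
  cases l with
  | nil => simp [pvPref, pvMaxr]
  | cons c rest => by_cases h : c = ')' <;> simp [pvPref, pvMaxr, h]

theorem pvPref_le_length (l : List Char) : pvPref l ≤ l.length := by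
  induction l with
  | nil => simp [pvPref]
  | cons c rest ih => by_cases h : c = ')' <;> simp [pvPref, h]; omega

theorem pvMaxr_le_length (l : List Char) : pvMaxr l ≤ l.length := by
  induction l with
  | nil => simp [pvMaxr]
  | cons c rest ih =>
    have hp := pvPref_le_length rest
    by_cases h : c = ')' <;> simp [pvMaxr, h] <;> omega

theorem pvReplicate_pref_prefix (l : List Char) : List.replicate (pvPref l) ')' <+: l := by
  induction l with
  | nil => simp [pvPref]
  | cons c rest ih =>
    by_cases h : c = ')'
    · subst h
      rw [pvPref, if_pos rfl, List.replicate_succ]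
      exact List.cons_prefix_cons.mpr ⟨rfl, ih⟩
    · simp [pvPref, h]

theorem pvPrefix_le_pref (l : List Char) : ∀ (k : Nat), List.replicate k ')' <+: l →
    k ≤ pvPref l := by
  induction l with
  | nil =>
    intro k h
    have := List.prefix_nil.mp h
    cases k with
    | zero => simp
    | succ n => simp [List.replicate_succ] at this
  | cons c rest ih =>
    intro k h
    cases k with
    | zero => simp
    | succ n =>
      rw [List.replicate_succ, List.cons_prefix_cons] at h
      obtain ⟨hc, hp⟩ := h
      simp [pvPref, ← hc]
      exact ih n hp

theorem pvReplicate_maxr_infix (l : List Char) : List.replicate (pvMaxr l) ')' <:+: l := by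
  induction l with
  | nil => simp [pvMaxr]
  | cons c rest ih =>
    by_cases h : c = ')'
    · subst h
      rw [pvMaxr, if_pos rfl]
      rcases Nat.le_total (pvMaxr rest) (pvPref rest + 1) with hle | hle
      · rw [max_eq_left hle, List.replicate_succ]
        exact (List.cons_prefix_cons.mpr ⟨rfl, pvReplicate_pref_prefix rest⟩).isInfix
      · rw [max_eq_right hle]
        exact ih.trans (List.suffix_cons ')' rest).isInfix
    · simp only [pvMaxr, if_neg h]
      exact ih.trans (List.suffix_cons c rest).isInfix

theorem pvInfix_le_maxr (l : List Char) (k : Nat) (h : List.replicate k ')' <:+: l) :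
    k ≤ pvMaxr l := by
  induction l generalizing k with
  | nil =>
    have := h.sublist.length_le
    simp at this
    omega
  | cons c rest ih =>
    rcases List.infix_cons_iff.mp h with hpre | hinf
    · cases k with
      | zero => simp
      | succ n =>
        rw [List.replicate_succ, List.cons_prefix_cons] at hpre
        obtain ⟨hc, hp⟩ := hpre
        have hn := pvPrefix_le_pref rest n hp
        simp [pvMaxr, ← hc]
        omega
    · have := ih k hinf
      by_cases hc : c = ')' <;> simp [pvMaxr, hc] <;> omega

theorem pvReplicate_infix_iff (l : List Char) (k : Nat) :
    List.replicate k ')' <:+: l ↔ k ≤ pvMaxr l := by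
  constructor
  · exact pvInfix_le_maxr l k
  · intro hk
    have hpre : List.replicate k ')' <+: List.replicate (pvMaxr l) ')' := by
      refine ⟨List.replicate (pvMaxr l - k) ')', ?_⟩
      rw [← List.replicate_add]
      congr 1
      omega
    exact hpre.isInfix.trans (pvReplicate_maxr_infix l)

-- A's loop from state (m, count) computes max(m, count + leading run, max run)
theorem pvALoop_eq (l : List Char) : ∀ m c : Int, 0 ≤ c →
    pvALoop l m c = max m (max (c + (pvPref l : Int)) (pvMaxr l : Int)) := by
  induction l with
  | nil => intro m c hc; simp only [pvALoop, pvPref, pvMaxr, Nat.cast_zero]; omega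
  | cons x rest ih =>
    intro m c hc
    have hpl := pvPref_le_pvMaxr rest
    by_cases hx : x = ')'
    · rw [show pvALoop (x :: rest) m c = pvALoop rest m (c + 1) by simp [pvALoop, hx]]
      rw [ih m (c + 1) (by omega)]
      simp only [pvPref, pvMaxr, if_pos hx]
      push_cast
      omega
    · rw [show pvALoop (x :: rest) m c = pvALoop rest (max c m) 0 by simp [pvALoop, hx]]
      rw [ih (max c m) 0 le_rfl]
      simp only [pvPref, pvMaxr, if_neg hx]
      push_cast
      omega

theorem pvA_eq_maxr (s : String) : count_smiley_py s = (pvMaxr s.toList : Int) := by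
  unfold count_smiley_py
  rw [pvALoop_eq s.toList 0 0 le_rfl]
  have := pvPref_le_pvMaxr s.toList
  omega

theorem pvIsIn_iff (cs : List Char) (mid : Int) :
    PySem.Chars.isIn (PySem.List.pyRepeat [')'] mid) cs = true ↔ mid.toNat ≤ pvMaxr cs := by
  rw [PySem.List.pyRepeat_singleton, PySem.Chars.isIn_iff_infix, pvReplicate_infix_iff]

theorem pvBSearch_eq (cs : List Char) : ∀ (fuel : Nat) (lo hi : Int), 0 ≤ lo →
    lo ≤ (pvMaxr cs : Int) → (pvMaxr cs : Int) ≤ hi → (hi - lo).toNat ≤ fuel →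
    pvBSearch cs fuel lo hi = (pvMaxr cs : Int) := by
  intro fuel
  induction fuel with
  | zero => intro lo hi hlo hlom hmhi hgap; rw [pvBSearch]; omega
  | succ fuel ih =>
    intro lo hi hlo hlom hmhi hgap
    rw [pvBSearch]
    by_cases h : lo < hi
    · rw [if_pos h]
      have hm : PySem.Int.floordiv (lo + hi + 1) 2 = (lo + hi + 1) / 2 :=
        PySem.Int.floordiv_eq_ediv_of_pos (by norm_num)
      by_cases hin : PySem.Chars.isIn (PySem.List.pyRepeat [')']
          (PySem.Int.floordiv (lo + hi + 1) 2)) cs = true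
      · rw [if_pos hin]
        have hle := (pvIsIn_iff cs _).mp hin
        exact ih _ hi (by omega) (by omega) hmhi (by omega)
      · rw [if_neg hin]
        have hgt : ¬ (PySem.Int.floordiv (lo + hi + 1) 2).toNat ≤ pvMaxr cs :=
          fun hc => hin ((pvIsIn_iff cs _).mpr hc)
        exact ih lo _ hlo hlom (by omega) (by omega)
    · rw [if_neg h]
      omega

theorem pvB_eq_maxr (s : String) : count_smiley_py_alt s = (pvMaxr s.toList : Int) := by
  unfold count_smiley_py_alt
  have hlen := pvMaxr_le_length s.toList
  have hl : PySem.Str.len s = (s.toList.length : Int) := PySem.Str.len_eq s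
  exact pvBSearch_eq s.toList _ 0 _ le_rfl (by positivity) (by omega) (by omega)

-- ===== VERDICT (by name: the statement is the Claim_ definition above) =====
theorem count_smiley_py_spec : Claim_equal_count_smiley_py := by
  intro s _
  unfold Spec_count_smiley_py
  rw [pvA_eq_maxr, pvB_eq_maxr]
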